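-- pv_equiv track=rewrite | github.com/george-cm/csv2xlsx | csv2xlsx/xlsx2csv.py | fix_header_duplicate_fields
-- ===== SOURCE A (Python) =====
-- def fix_header_duplicate_fields(header):
--     fields = list()
--     new_header = list()
--     for field in header:
--         count = fields.count(field)
--         if count == 0:
--             new_header.append(field)
--         else:
--             new_header.append(f"{field}{count}")
--         fields.append(field)
--     return new_header
-- ===== SOURCE B (Python) =====
-- def fix_header_duplicate_fields(header):
--     positions = {}
--     for i, field in enumerate(header):
--         positions.setdefault(field, []).append(i)
--     result = [""] * len(header)
--     for field, idxs in positions.items():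
--         for occ, p in enumerate(idxs):
--             result[p] = field if occ == 0 else f"{field}{occ}"
--     return result
-- ===== Notes on version B (the rewrite author's own statement) =====
-- stated objective: faster
-- what changed: Replaces A's streaming emit with an O(n) fields.count rescan per element by a single group-by pass (dict field -> ordered index list built with enumerate) followed by a per-group scatter that writes field / f'{field}{occ}' into a preallocated result list.
import Mathlib
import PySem

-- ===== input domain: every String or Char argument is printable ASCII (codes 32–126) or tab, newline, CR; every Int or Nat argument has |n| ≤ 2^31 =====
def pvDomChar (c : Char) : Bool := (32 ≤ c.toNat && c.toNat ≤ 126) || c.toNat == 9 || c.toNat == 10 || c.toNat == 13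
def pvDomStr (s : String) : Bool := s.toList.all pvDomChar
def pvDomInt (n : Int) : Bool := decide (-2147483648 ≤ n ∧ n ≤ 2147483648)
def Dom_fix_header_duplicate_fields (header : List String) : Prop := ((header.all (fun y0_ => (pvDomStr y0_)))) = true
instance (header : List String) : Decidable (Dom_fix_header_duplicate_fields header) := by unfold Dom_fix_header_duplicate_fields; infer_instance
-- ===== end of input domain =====

-- B replaces A's streaming emit (quadratic fields.count rescan) by a group-by index table plus a per-group scatter pass (alternative decomposition).


-- ===== PORT A =====
-- literal port of A: one loop keeping (fields, new_header); count = fields.count(field)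
def fix_header_duplicate_fields (header : List String) : List String :=
  (header.foldl
    (fun (st : List String × List String) field =>
      let count := PySem.List.count st.1 field
      let new_header :=
        if count = 0 then st.2 ++ [field]
        else st.2 ++ [field ++ PySem.Int.toStr (count : Int)]
      (st.1 ++ [field], new_header))
    ([], [])).2

-- ===== PORT B =====
-- literal port of Source B: positions.setdefault(field, []).append(i) is Dict.modify field [] (· ++ [i])
-- (PySem.Dict.modify is exactly d[k] = f(d.get(k, dflt))); result[p] = v is pySetD (p is an enumerate index, always in range).
def fix_header_duplicate_fields_alt (header : List String) : List String :=
  let positions : PySem.Dict String (List Int) :=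
    (PySem.List.enumerate header).foldl
      (fun d p => d.modify p.2 [] (fun l => l ++ [p.1])) ∅
  let result := PySem.List.pyRepeat [""] (PySem.List.len header)
  positions.items.foldl
    (fun result fi =>
      (PySem.List.enumerate fi.2).foldl
        (fun result op =>
          PySem.List.pySetD result op.2
            (if op.1 = 0 then fi.1 else fi.1 ++ PySem.Int.toStr op.1))
        result)
    result

-- ===== PRECONDITION & SPEC =====
def Spec_fix_header_duplicate_fields (header : List String) (out : List String) : Prop := out = fix_header_duplicate_fields_alt header
instance (header : List String) (out : List String) : Decidable (Spec_fix_header_duplicate_fields header out) := by unfold Spec_fix_header_duplicate_fields; infer_instance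

-- ===== CLAIM (what is proved, stated in full; the proofs are below) =====
def Claim_equal_fix_header_duplicate_fields : Prop := ∀ (header : List String), Dom_fix_header_duplicate_fields header → Spec_fix_header_duplicate_fields header (fix_header_duplicate_fields header)

-- ===== LEMMAS AND PROOFS =====

-- the renamed field for occurrence number c (c = how many equal fields came before)
def pvRename (f : String) (c : Int) : String := if c = 0 then f else f ++ PySem.Int.toStr c

-- the ordered list of indices (counted from s) at which f occurs in hl
def pvIdxL (s : Int) (hl : List String) (f : String) : List Int :=
  ((PySem.List.enumerate hl s).filter (fun p => p.2 == f)).map (·.1)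

-- reference output of A's loop, with the already-processed prefix as context
def pvOut (pre : List String) : List String → List String
  | [] => []
  | f :: rs => pvRename f (pre.count f) :: pvOut (pre ++ [f]) rs


-- ---- A-side characterisation ----

theorem pvA_loop (rest pre acc : List String) :
    (rest.foldl
      (fun (st : List String × List String) field =>
        let count := PySem.List.count st.1 field
        let new_header :=
          if count = 0 then st.2 ++ [field]
          else st.2 ++ [field ++ PySem.Int.toStr (count : Int)]
        (st.1 ++ [field], new_header))
      (pre, acc)) = (pre ++ rest, acc ++ pvOut pre rest) := by
  induction rest generalizing pre acc with
  | nil => simp [pvOut]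
  | cons f rs ih =>
    simp only [List.foldl_cons, pvOut]
    rw [ih]
    have hstep : (if PySem.List.count pre f = 0 then acc ++ [f]
        else acc ++ [f ++ PySem.Int.toStr (PySem.List.count pre f : Int)])
        = acc ++ [pvRename f ((pre.count f : Int))] := by
      simp only [pvRename, PySem.List.count]
      split_ifs <;> simp_all
    rw [hstep]
    simp [List.append_assoc]

theorem pvA_eq (header : List String) :
    fix_header_duplicate_fields header = pvOut [] header := by
  unfold fix_header_duplicate_fields
  rw [pvA_loop]
  simp

theorem pvOut_length (hl : List String) : ∀ (pre : List String), (pvOut pre hl).length = hl.length := by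
  induction hl with
  | nil => intro pre; simp [pvOut]
  | cons f rs ih => intro pre; simp [pvOut, ih]

theorem pvOut_getElem? (hl : List String) : ∀ (pre : List String) (q : Nat) (hq : q < hl.length),
    (pvOut pre hl)[q]? = some (pvRename hl[q] (((pre ++ hl.take q).count hl[q] : Int))) := by
  induction hl with
  | nil => intro pre q hq; simp at hq
  | cons f rs ih =>
    intro pre q hq
    cases q with
    | zero => simp [pvOut]
    | succ q =>
      simp only [pvOut, List.getElem?_cons_succ, List.getElem_cons_succ, List.take_succ_cons]
      rw [ih (pre ++ [f]) q (by simpa using hq)]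
      simp [List.append_assoc]

-- ---- pvIdxL facts ----

theorem pvIdxL_cons (s : Int) (h : String) (t : List String) (f : String) :
    pvIdxL s (h :: t) f = (if h = f then [s] else []) ++ pvIdxL (s + 1) t f := by
  simp only [pvIdxL, PySem.List.enumerate_cons, List.filter_cons]
  by_cases hf : h = f <;> simp [hf]

theorem pvIdxL_sorted (s : Int) (hl : List String) (f : String) :
    (pvIdxL s hl f).Pairwise (· < ·) := by
  unfold pvIdxL
  rw [List.pairwise_map]
  exact (PySem.List.pairwise_lt_enumerate hl s).filter _

theorem pvIdxL_nodup (s : Int) (hl : List String) (f : String) :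
    (pvIdxL s hl f).Nodup :=
  (pvIdxL_sorted s hl f).imp ne_of_lt

theorem mem_pvIdxL (s : Int) (hl : List String) (f : String) (x : Int) :
    x ∈ pvIdxL s hl f ↔ ∃ (k : Nat), ∃ (hk : k < hl.length), x = s + k ∧ hl[k] = f := by
  simp only [pvIdxL, List.mem_map, List.mem_filter, PySem.List.mem_enumerate_iff, beq_iff_eq]
  constructor
  · rintro ⟨p, ⟨⟨k, hk, rfl⟩, hf⟩, rfl⟩
    exact ⟨k, hk, rfl, hf⟩
  · rintro ⟨k, hk, rfl, hf⟩
    exact ⟨(s + k, hl[k]), ⟨⟨k, hk, rfl⟩, hf⟩, rfl⟩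

theorem pvIdxL_idxOf (hl : List String) (f : String) :
    ∀ (q : Nat) (s : Int), q < hl.length → (∀ (hq : q < hl.length), hl[q] = f) →
      List.idxOf ((s + q : Int)) (pvIdxL s hl f) = (hl.take q).count f := by
  induction hl with
  | nil => intro q s hq; simp at hq
  | cons h t ih =>
    intro q s hq hf
    cases q with
    | zero =>
      have : h = f := by simpa using hf (by simp)
      subst this
      simp [pvIdxL_cons]
    | succ q =>
      have hq' : q < t.length := by simpa using hq
      have hf' : ∀ (hqq : q < t.length), t[q] = f := by
        intro hqq; simpa using hf hq
      rw [pvIdxL_cons]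
      have harg : (s + ((q + 1 : Nat) : Int)) = ((s + 1) + ((q : Nat) : Int)) := by push_cast; ring
      by_cases hh : h = f
      · subst hh
        rw [if_pos rfl, List.singleton_append]
        have hne : s ≠ (s + ((q + 1 : Nat) : Int)) := by push_cast; omega
        rw [List.idxOf_cons_ne _ hne, harg, ih q (s + 1) hq' hf']
        simp
      · rw [if_neg hh, List.nil_append, harg, ih q (s + 1) hq' hf']
        simp [hh]

-- ---- generic scatter facts ----

theorem scatter_len (v : Int → String) :
    ∀ (l : List (Int × Int)) (res : List String),
      (l.foldl (fun r op => PySem.List.pySetD r op.2 (v op.1)) res).length = res.length := by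
  intro l
  induction l with
  | nil => intro res; rfl
  | cons p t ih => intro res; simp [ih, PySem.List.length_pySetD]

theorem scatter_get (v : Int → String) :
    ∀ (il : List Int) (s : Int) (res : List String) (q : Nat),
      (∀ p ∈ il, 0 ≤ p ∧ p.toNat < res.length) → il.Nodup →
      ((PySem.List.enumerate il s).foldl (fun r op => PySem.List.pySetD r op.2 (v op.1)) res)[q]? =
        if (q : Int) ∈ il then some (v (s + List.idxOf (q : Int) il)) else res[q]? := by
  intro il
  induction il with
  | nil => intro s res q _ _; simp [PySem.List.enumerate_nil]
  | cons p t ih =>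
    intro s res q hrange hnd
    obtain ⟨hp0, hplt⟩ := hrange p (by simp)
    have hlen' : (PySem.List.pySetD res p (v s)).length = res.length := PySem.List.length_pySetD ..
    rw [PySem.List.enumerate_cons, List.foldl_cons]
    rw [ih (s + 1) _ q (fun x hx => by
        obtain ⟨h0, hl⟩ := hrange x (by simp [hx]); exact ⟨h0, by rwa [hlen']⟩)
      hnd.of_cons]
    dsimp only
    by_cases hqp : (q : Int) = p
    · have hqmem : (q : Int) ∉ t := by rw [hqp]; exact (List.nodup_cons.mp hnd).1
      subst hqp
      rw [if_neg hqmem, if_pos (by simp), List.idxOf_cons_self]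
      rw [PySem.List.pySetD_of_nonneg _ _ hp0]
      simp only [Int.toNat_natCast]
      rw [List.getElem?_set_self (by simpa using hplt)]
      simp
    · have hset : (PySem.List.pySetD res p (v s))[q]? = res[q]? := by
        rw [PySem.List.pySetD_of_nonneg _ _ hp0]
        apply List.getElem?_set_ne
        intro hcontra
        apply hqp
        rw [← hcontra]
        exact Int.toNat_of_nonneg hp0
      by_cases hqt : (q : Int) ∈ t
      · rw [if_pos hqt, if_pos (List.mem_cons_of_mem _ hqt),
           List.idxOf_cons_ne _ (fun h => hqp h.symm)]
        have : (s + ((List.idxOf ((q : Nat) : Int) t).succ : Int)) =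
            s + 1 + ((List.idxOf ((q : Nat) : Int) t : Nat) : Int) := by push_cast; ring
        rw [this]
      · rw [if_neg hqt, if_neg (by simp [hqp, hqt]), hset]


-- ---- outer scatter over the groups ----

theorem outer_len :
    ∀ (gs : List (String × List Int)) (res : List String),
      (gs.foldl
        (fun r fi => (PySem.List.enumerate fi.2).foldl
          (fun r op => PySem.List.pySetD r op.2 (pvRename fi.1 op.1)) r) res).length = res.length := by
  intro gs
  induction gs with
  | nil => intro res; rfl
  | cons g t ih => intro res; rw [List.foldl_cons, ih, scatter_len (pvRename g.1)]

theorem outer_get (header : List String) :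
    ∀ (ks : List String) (res : List String) (q : Nat) (hq : q < header.length),
      res.length = header.length →
      ((ks.map (fun k => (k, pvIdxL 0 header k))).foldl
         (fun r fi => (PySem.List.enumerate fi.2).foldl
           (fun r op => PySem.List.pySetD r op.2 (pvRename fi.1 op.1)) r) res)[q]? =
        if header[q] ∈ ks then some (pvRename header[q] ((header.take q).count header[q] : Int))
        else res[q]? := by
  intro ks
  induction ks with
  | nil => intro res q hq hlen; simp
  | cons k kt ih =>
    intro res q hq hlen
    rw [List.map_cons, List.foldl_cons]
    dsimp only
    have hres' := scatter_len (pvRename k) (PySem.List.enumerate (pvIdxL 0 header k) 0) res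
    rw [ih _ q hq (by rw [hres', hlen])]
    have hrange : ∀ p ∈ pvIdxL 0 header k, 0 ≤ p ∧ p.toNat < res.length := by
      intro p hp
      rw [mem_pvIdxL] at hp
      obtain ⟨kk, hk, rfl, _⟩ := hp
      refine ⟨by positivity, ?_⟩
      have h2 : ((0 + (kk : Int))).toNat = kk := by omega
      rw [h2, hlen]; exact hk
    have hsc := scatter_get (pvRename k) (pvIdxL 0 header k) 0 res q hrange (pvIdxL_nodup 0 header k)
    by_cases hkt : header[q] ∈ kt
    · rw [if_pos hkt, if_pos (List.mem_cons_of_mem _ hkt)]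
    · rw [if_neg hkt, hsc]
      by_cases hmem : header[q] = k
      · have hqin : ((q : Nat) : Int) ∈ pvIdxL 0 header k :=
          (mem_pvIdxL 0 header k q).mpr ⟨q, hq, by simp, hmem⟩
        rw [if_pos hqin, if_pos (by simp [hmem])]
        have hidx : List.idxOf ((q : Nat) : Int) (pvIdxL 0 header k) = (header.take q).count k := by
          have := pvIdxL_idxOf header k q 0 hq (fun _ => hmem)
          simpa using this
        rw [hidx, hmem]
        simp
      · have hqnin : ((q : Nat) : Int) ∉ pvIdxL 0 header k := by
          rw [mem_pvIdxL]
          rintro ⟨kk, hk, hqeq, hfk⟩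
          have : kk = q := by omega
          subst this
          exact hmem hfk
        rw [if_neg hqnin, if_neg (by simp [hmem, hkt])]

-- ---- the dictionary of positions ----

theorem pvDict_getD (header : List String) (f : String) :
    ((PySem.List.enumerate header).foldl
      (fun (d : PySem.Dict String (List Int)) p => d.modify p.2 [] (fun l => l ++ [p.1])) ∅).getD f []
    = pvIdxL 0 header f := by
  have h1 : ((PySem.List.enumerate header).map (fun p => (p.2, p.1))).foldl
      (fun (d : PySem.Dict String (List Int)) p => d.modify p.1 [] (fun l => l ++ [p.2])) ∅
      = (PySem.List.enumerate header).foldl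
      (fun (d : PySem.Dict String (List Int)) p => d.modify p.2 [] (fun l => l ++ [p.1])) ∅ :=
    List.foldl_map
  rw [← h1, PySem.Dict.getD_foldl_modify_append]
  have h0 : (∅ : PySem.Dict String (List Int)).getD f [] = [] := rfl
  simp [h0, pvIdxL, List.filter_map, List.map_map, Function.comp_def]

theorem pvDict_keys (header : List String) :
    ((PySem.List.enumerate header).foldl
      (fun (d : PySem.Dict String (List Int)) p => d.modify p.2 [] (fun l => l ++ [p.1])) ∅).keys
    = PySem.Set.update ([] : List String) header := by
  rw [PySem.Dict.keys_foldl_modify_key (PySem.List.enumerate header) (fun p => p.2) []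
    (fun _ p => (fun l => l ++ [p.1]))]
  rw [PySem.List.map_snd_enumerate]
  rfl

theorem pvDict_keys_nodup (header : List String) :
    ((PySem.List.enumerate header).foldl
      (fun (d : PySem.Dict String (List Int)) p => d.modify p.2 [] (fun l => l ++ [p.1])) ∅).keys.Nodup := by
  apply PySem.Dict.nodup_keys_foldl_modify_key (PySem.List.enumerate header) (fun p => p.2) []
    (fun _ p => (fun l => l ++ [p.1]))
  exact List.nodup_nil

-- ---- B pointwise and length ----

theorem pvB_getElem? (header : List String) (q : Nat) (hq : q < header.length) :
    (fix_header_duplicate_fields_alt header)[q]? =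
      some (pvRename header[q] ((header.take q).count header[q] : Int)) := by
  simp only [fix_header_duplicate_fields_alt]
  rw [PySem.Dict.items_eq_map_keys _ (pvDict_keys_nodup header) []]
  rw [List.map_congr_left (fun k _ => by rw [pvDict_getD header k])]
  have hlen : (PySem.List.pyRepeat [""] (PySem.List.len header)).length = header.length := by
    rw [PySem.List.pyRepeat_singleton]
    simp [PySem.List.len]
  have hmemk : header[q] ∈ ((PySem.List.enumerate header).foldl
      (fun (d : PySem.Dict String (List Int)) p => d.modify p.2 [] (fun l => l ++ [p.1])) ∅).keys := by
    rw [pvDict_keys, PySem.Set.mem_update]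
    exact Or.inr (List.getElem_mem hq)
  have hog := outer_get header ((PySem.List.enumerate header).foldl
      (fun (d : PySem.Dict String (List Int)) p => d.modify p.2 [] (fun l => l ++ [p.1])) ∅).keys
    (PySem.List.pyRepeat [""] (PySem.List.len header)) q hq hlen
  rw [if_pos hmemk] at hog
  exact hog

theorem pvB_length (header : List String) :
    (fix_header_duplicate_fields_alt header).length = header.length := by
  simp only [fix_header_duplicate_fields_alt]
  have h1 := outer_len (((PySem.List.enumerate header).foldl
      (fun (d : PySem.Dict String (List Int)) p => d.modify p.2 [] (fun l => l ++ [p.1])) ∅).items)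
    (PySem.List.pyRepeat [""] (PySem.List.len header))
  refine h1.trans ?_
  rw [PySem.List.pyRepeat_singleton]
  simp [PySem.List.len]

theorem fix_header_duplicate_fields_spec : Claim_equal_fix_header_duplicate_fields := by
  unfold Claim_equal_fix_header_duplicate_fields
  intro header _
  unfold Spec_fix_header_duplicate_fields
  apply List.ext_getElem?
  intro q
  by_cases hq : q < header.length
  · rw [pvA_eq, pvOut_getElem? header [] q (by simpa using hq), pvB_getElem? header q hq]
    simp
  · have hA : (pvOut [] header).length ≤ q := by
      rw [pvOut_length]; omega
    rw [pvA_eq, List.getElem?_eq_none hA, List.getElem?_eq_none (by rw [pvB_length]; omega)]
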